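-- pv_equiv track=rewrite | github.com/shrinidhikr/NPTEL-Python_Assignments | count.py | cou
-- ===== SOURCE A (Python) =====
-- def cou(l):
--   count=0
--   a=[]
--   b=[]
--   for x in l:
--     count=0
--     for i in range(len(l)):
--       if x == l[i]:
--         count= count+1
--     a.append((count,x))
--   for y in a:
--     if y not in b:
--       b.append(y)
--   return(sorted(b))
-- ===== SOURCE B (Python) =====
-- def cou(l):
--     s = sorted(l)
--     pairs = []
--     i = 0
--     n = len(s)
--     while i < n:
--         j = i
--         while j < n and s[j] == s[i]:
--             j += 1
--         pairs.append((j - i, s[i]))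
--         i = j
--     return sorted(pairs)
-- ===== Notes on version B (the rewrite author's own statement) =====
-- stated objective: faster
-- what changed: Replaces A's per-element full rescan (count of x recomputed for every occurrence) and separate dedup pass with one sort followed by a single run-length grouping pass that yields each distinct value's (count, value) pair exactly once.
import Mathlib
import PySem

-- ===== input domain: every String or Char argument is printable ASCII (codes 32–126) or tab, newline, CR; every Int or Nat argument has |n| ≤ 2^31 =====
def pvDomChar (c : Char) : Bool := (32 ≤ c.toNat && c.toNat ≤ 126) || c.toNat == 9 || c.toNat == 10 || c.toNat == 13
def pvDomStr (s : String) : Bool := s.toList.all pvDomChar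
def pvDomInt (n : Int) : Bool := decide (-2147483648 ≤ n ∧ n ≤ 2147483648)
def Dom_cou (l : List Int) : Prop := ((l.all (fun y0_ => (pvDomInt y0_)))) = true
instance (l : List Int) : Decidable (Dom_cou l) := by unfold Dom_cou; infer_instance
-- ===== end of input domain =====

-- B replaces A's quadratic per-element rescans and separate dedup pass with sort + one run-length grouping pass (objective: faster).

-- ===== PORT A =====
-- inner loop: for i in range(len(l)): if x == l[i]: count += 1
def couCount (l : List Int) (x : Int) : Int :=
  (PySem.List.pyRange 0 (PySem.List.len l)).foldl
    (fun count i => if x == PySem.List.pyGetD l i 0 then count + 1 else count) 0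

def cou (l : List Int) : List (Int × Int) :=
  let a : List (Int × Int) := l.foldl (fun a x => a ++ [(couCount l x, x)]) []
  let b : List (Int × Int) := a.foldl (fun b y => if y ∈ b then b else b ++ [y]) []
  PySem.List.sorted b (fun y => toLex y)

-- ===== PORT B =====
-- run-length grouping of the sorted list: the two nested while loops of Source B
def runs : List Int → List (Int × Int)
  | [] => []
  | x :: xs =>
    (((xs.takeWhile (fun z => z == x)).length : Int) + 1, x) ::
      runs (xs.dropWhile (fun z => z == x))
termination_by s => s.length
decreasing_by
  simp only [List.length_cons]
  exact Nat.lt_succ_of_le (List.Sublist.length_le (List.dropWhile_sublist _))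

def cou_alt (l : List Int) : List (Int × Int) :=
  let s := PySem.List.sorted l (fun x => x)
  let pairs := runs s
  PySem.List.sorted pairs (fun y => toLex y)

-- ===== PRECONDITION & SPEC =====
def Spec_cou (l : List Int) (out : List (Int × Int)) : Prop := out = cou_alt l
instance (l : List Int) (out : List (Int × Int)) : Decidable (Spec_cou l out) := by unfold Spec_cou; infer_instance

-- ===== CLAIM (what is proved, stated in full; the proofs are below) =====
def Claim_equal_cou : Prop := ∀ (l : List Int), Dom_cou l → Spec_cou l (cou l)

-- ===== LEMMAS AND PROOFS =====

lemma couCount_eq (l : List Int) (x : Int) : couCount l x = (l.count x : Int) := by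
  unfold couCount
  rw [PySem.List.foldl_pyRange_pyGetD l 0
    (fun count v => if x == v then count + 1 else count) 0 le_rfl]
  rw [Int.toNat_zero, List.drop_zero, PySem.List.foldl_count_if (fun v => x == v) l 0]
  rw [zero_add]
  congr 1
  apply List.countP_congr
  intro a _
  by_cases h : x = a
  · subst h; rfl
  · simp [h, Ne.symm h]

lemma mem_dedupFold (a : List (Int × Int)) (acc : List (Int × Int)) (y : Int × Int) :
    y ∈ a.foldl (fun b y => if y ∈ b then b else b ++ [y]) acc ↔ y ∈ acc ∨ y ∈ a := by
  induction a generalizing acc with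
  | nil => simp
  | cons z a ih =>
    simp only [List.foldl_cons, ih]
    by_cases hz : z ∈ acc
    · simp only [if_pos hz, List.mem_cons]
      constructor
      · rintro (h1 | h1)
        · exact Or.inl h1
        · exact Or.inr (Or.inr h1)
      · rintro (h1 | rfl | h1)
        · exact Or.inl h1
        · exact Or.inl hz
        · exact Or.inr h1
    · simp [hz, List.mem_append, or_assoc]

lemma nodup_dedupFold (a : List (Int × Int)) (acc : List (Int × Int)) (h : acc.Nodup) :
    (a.foldl (fun b y => if y ∈ b then b else b ++ [y]) acc).Nodup := by
  induction a generalizing acc with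
  | nil => exact h
  | cons z a ih =>
    simp only [List.foldl_cons]
    by_cases hz : z ∈ acc
    · simpa [hz] using ih acc h
    · simp only [if_neg hz]
      refine ih _ (List.Nodup.append h (List.nodup_singleton z) ?_)
      intro y hy hyz
      simp only [List.mem_singleton] at hyz
      subst hyz
      exact hz hy

lemma lt_of_mem_dropWhile (x : Int) (xs : List Int) (h : (x :: xs).Pairwise (· ≤ ·)) :
    ∀ v ∈ xs.dropWhile (fun z => z == x), x < v := by
  have hxle : ∀ z ∈ xs, x ≤ z := (List.pairwise_cons.mp h).1
  have hrp : (xs.dropWhile (fun z => z == x)).Pairwise (· ≤ ·) :=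
    ((List.pairwise_cons.mp h).2).sublist (List.dropWhile_sublist _)
  intro v hv
  cases hr : xs.dropWhile (fun z => z == x) with
  | nil => rw [hr] at hv; simp at hv
  | cons d r' =>
    have hdmem : d ∈ xs := (List.dropWhile_sublist _).mem (by rw [hr]; exact List.mem_cons_self)
    have hdx : x ≤ d := hxle d hdmem
    have hne : xs.dropWhile (fun z => z == x) ≠ [] := by rw [hr]; simp
    have hhd := List.head_dropWhile_not (fun z => z == x) hne
    simp only [hr] at hhd
    simp only [List.head_cons] at hhd
    have hdne : d ≠ x := by intro he; rw [he] at hhd; simp at hhd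
    have hxd : x < d := lt_of_le_of_ne hdx (fun he => hdne he.symm)
    rw [hr] at hv
    rcases List.mem_cons.mp hv with rfl | hv'
    · exact hxd
    · have : d ≤ v := by
        rw [hr] at hrp
        exact (List.pairwise_cons.mp hrp).1 v hv'
      exact lt_of_lt_of_le hxd this

lemma snd_mem_runs : ∀ (s : List Int), ∀ y ∈ runs s, y.2 ∈ s := by
  intro s
  induction s using runs.induct with
  | case1 => simp [runs]
  | case2 x xs ih =>
    intro y hy
    rw [runs] at hy
    rcases List.mem_cons.mp hy with rfl | hy'
    · exact List.mem_cons_self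
    · have := ih y hy'
      exact List.mem_cons_of_mem _ ((List.dropWhile_sublist _).mem this)

lemma nodup_runs : ∀ (s : List Int), s.Pairwise (· ≤ ·) → (runs s).Nodup := by
  intro s
  induction s using runs.induct with
  | case1 => intro _; simp [runs]
  | case2 x xs ih =>
    intro h
    rw [runs]
    refine List.nodup_cons.mpr ⟨?_, ih (((List.pairwise_cons.mp h).2).sublist (List.dropWhile_sublist _))⟩
    intro hmem
    have hx : x ∈ xs.dropWhile (fun z => z == x) := snd_mem_runs _ _ hmem
    exact absurd (lt_of_mem_dropWhile x xs h x hx) (lt_irrefl x)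

lemma mem_runs_iff : ∀ (s : List Int), s.Pairwise (· ≤ ·) → ∀ y : Int × Int,
    (y ∈ runs s ↔ ∃ v ∈ s, y = ((s.count v : Int), v)) := by
  intro s
  induction s using runs.induct with
  | case1 => intro _ y; simp [runs]
  | case2 x xs ih =>
    intro h y
    have hrp : (xs.dropWhile (fun z => z == x)).Pairwise (· ≤ ·) :=
      ((List.pairwise_cons.mp h).2).sublist (List.dropWhile_sublist _)
    have hgt := lt_of_mem_dropWhile x xs h
    have htr : xs.takeWhile (fun z => z == x) ++ xs.dropWhile (fun z => z == x) = xs :=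
      List.takeWhile_append_dropWhile
    have hmemt : ∀ z ∈ xs.takeWhile (fun z => z == x), z = x := by
      intro z hz
      have := List.mem_takeWhile_imp hz
      simpa using this
    have h1 : (xs.takeWhile (fun z => z == x)).count x
        = (xs.takeWhile (fun z => z == x)).length := by
      rw [List.count_eq_length]
      intro b hb
      exact (hmemt b hb).symm
    have h2 : (xs.dropWhile (fun z => z == x)).count x = 0 := by
      rw [List.count_eq_zero]
      intro hx
      exact absurd (hgt x hx) (lt_irrefl x)
    have hcx : (x :: xs).count x = (xs.takeWhile (fun z => z == x)).length + 1 := by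
      have hsplit : List.count x xs = (xs.takeWhile (fun z => z == x)).count x
          + (xs.dropWhile (fun z => z == x)).count x := by
        conv_lhs => rw [← htr]
        exact List.count_append ..
      rw [List.count_cons_self]
      omega
    have hcv : ∀ v ∈ xs.dropWhile (fun z => z == x),
        (x :: xs).count v = (xs.dropWhile (fun z => z == x)).count v := by
      intro v hv
      have hvx : x ≠ v := ne_of_lt (hgt v hv)
      have h1 : (xs.takeWhile (fun z => z == x)).count v = 0 := by
        rw [List.count_eq_zero]
        intro hvt
        exact hvx ((hmemt v hvt).symm)
      have hsplit : List.count v xs = (xs.takeWhile (fun z => z == x)).count v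
          + (xs.dropWhile (fun z => z == x)).count v := by
        conv_lhs => rw [← htr]
        exact List.count_append ..
      have hcc : List.count v (x :: xs) = List.count v xs := by
        simp [hvx]
      rw [hcc]
      omega
    rw [runs]
    constructor
    · intro hy
      rcases List.mem_cons.mp hy with rfl | hy'
      · exact ⟨x, List.mem_cons_self, by rw [hcx]; simp⟩
      · obtain ⟨v, hvr, rfl⟩ := (ih hrp y).mp hy'
        refine ⟨v, List.mem_cons_of_mem _ ((List.dropWhile_sublist _).mem hvr), ?_⟩
        rw [hcv v hvr]
    · rintro ⟨v, hv, rfl⟩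
      rcases List.mem_cons.mp hv with rfl | hvxs
      · exact List.mem_cons.mpr (Or.inl (by rw [hcx]; simp))
      · rcases (List.mem_append.mp (htr ▸ hvxs)) with hvt | hvr
        · have hvx := hmemt v hvt
          subst hvx
          exact List.mem_cons.mpr (Or.inl (by rw [hcx]; simp))
        · refine List.mem_cons.mpr (Or.inr ((ih hrp _).mpr ⟨v, hvr, ?_⟩))
          rw [hcv v hvr]

-- ===== VERDICT (by name: the statement is the Claim_ definition above) =====
theorem cou_spec : Claim_equal_cou := by
  unfold Claim_equal_cou
  intro l _
  unfold Spec_cou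
  simp only [cou, cou_alt]
  set s := PySem.List.sorted l (fun x => x) with hs
  have hsperm : s.Perm l := PySem.List.sorted_perm l (fun x => x) false
  have hspw : s.Pairwise (· ≤ ·) := by
    have := PySem.List.sorted_pairwise l (fun x => x)
    simpa using this
  have ha : l.foldl (fun a x => a ++ [(couCount l x, x)]) ([] : List (Int × Int))
      = l.map (fun x => ((l.count x : Int), x)) := by
    have hfc : l.foldl (fun a x => a ++ [(couCount l x, x)]) ([] : List (Int × Int))
        = l.foldl (fun a x => a ++ [((l.count x : Int), x)]) [] := by
      apply PySem.List.foldl_congr_mem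
      intro acc x hx
      rw [couCount_eq]
    rw [hfc, PySem.List.foldl_append_singleton_eq_map, List.nil_append]
  rw [ha]
  set a := l.map (fun x => ((l.count x : Int), x)) with hadef
  set b := a.foldl (fun b y => if y ∈ b then b else b ++ [y]) [] with hbdef
  have hbnd : b.Nodup := nodup_dedupFold a [] List.nodup_nil
  have hrnd : (runs s).Nodup := nodup_runs s hspw
  have hperm : b.Perm (runs s) := by
    rw [List.perm_ext_iff_of_nodup hbnd hrnd]
    intro y
    rw [hbdef, mem_dedupFold]
    simp only [List.not_mem_nil, false_or]
    rw [mem_runs_iff s hspw y, hadef]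
    simp only [List.mem_map]
    constructor
    · rintro ⟨x, hx, rfl⟩
      exact ⟨x, hsperm.mem_iff.mpr hx, by rw [hsperm.count_eq]⟩
    · rintro ⟨v, hv, rfl⟩
      exact ⟨v, hsperm.mem_iff.mp hv, by rw [hsperm.count_eq]⟩
  exact PySem.List.sorted_eq_sorted_of_perm b (runs s) (fun y => toLex y)
    (toLex.injective) hperm
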